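-- pv_equiv track=rewrite | github.com/valenciaaaalim/whatsapp_chat_1 | web-app/backend/app/services/risk_assessment.py | _fallback_conversational_rewrite
-- ===== SOURCE A (Python) =====
-- from typing import List, Dict, Any, Optional
--
-- def _fallback_conversational_rewrite(
--
--     draft_text: str,
--     masked_draft: Optional[str] = None
-- ) -> str:
--     """
--     Create a conversational privacy-preserving fallback rewrite.
--     Never return raw masked placeholders to users.
--     """
--     source = (masked_draft or draft_text or "").lower()
--     has_location = "location" in source or "address" in source or "where" in source
--     has_phone = "phone" in source or "mobile" in source or "number" in source
--     has_email = "email" in source or "mail" in source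
--     has_dob = "birth" in source or "dob" in source or "age" in source
--     has_financial = "bank" in source or "card" in source or "account" in source or "payment" in source
--     has_id = "id" in source or "passport" in source or "nric" in source or "license" in source
--
--     sensitive_hits = sum(
--         1 for flag in [has_location, has_phone, has_email, has_dob, has_financial, has_id] if flag
--     )
--     if sensitive_hits >= 2:
--         return "I’m not comfortable sharing those personal details right now, but I can continue without them."
--     if has_location:
--         return "I’m not comfortable sharing my exact location right now."
--     if has_phone:
--         return "I’m not comfortable sharing my phone number right now."
--     if has_email:
--         return "I’d prefer not to share my email address right now."
--     if has_dob:
--         return "I’d prefer not to share my date of birth."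
--     if has_financial:
--         return "I can’t share financial account details here."
--     if has_id:
--         return "I’m not comfortable sharing my ID details here."
--     return "I’d prefer to keep that personal information private for now."
-- ===== SOURCE B (Python) =====
-- from typing import Optional
--
-- # keyword -> category index (0=location,1=phone,2=email,3=dob,4=financial,5=id)
-- _KEYWORDS = {
--     "location": 0, "address": 0, "where": 0,
--     "phone": 1, "mobile": 1, "number": 1,
--     "email": 2, "mail": 2,
--     "birth": 3, "dob": 3, "age": 3,
--     "bank": 4, "card": 4, "account": 4, "payment": 4,
--     "id": 5, "passport": 5, "nric": 5, "license": 5,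
-- }
--
-- _MESSAGES = [
--     "I’m not comfortable sharing my exact location right now.",
--     "I’m not comfortable sharing my phone number right now.",
--     "I’d prefer not to share my email address right now.",
--     "I’d prefer not to share my date of birth.",
--     "I can’t share financial account details here.",
--     "I’m not comfortable sharing my ID details here.",
-- ]
--
-- def _fallback_conversational_rewrite(
--     draft_text: str,
--     masked_draft: Optional[str] = None
-- ) -> str:
--     source = (masked_draft or draft_text or "").lower()
--     seen = [False] * 6
--     for i in range(len(source)):
--         for kw, cat in _KEYWORDS.items():
--             if source.startswith(kw, i):
--                 seen[cat] = True
--     hits = sum(1 for flag in seen if flag)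
--     if hits >= 2:
--         return "I’m not comfortable sharing those personal details right now, but I can continue without them."
--     if True in seen:
--         return _MESSAGES[seen.index(True)]
--     return "I’d prefer to keep that personal information private for now."
-- ===== Notes on version B (the rewrite author's own statement) =====
-- stated objective: alternative
-- what changed: Instead of six per-keyword substring-membership flags and a seven-branch if-elif ladder, B scans the text once position by position against a keyword-to-category table, marks a six-slot boolean seen-array, and derives the reply from the array's true-count and first true index.
import Mathlib
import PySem

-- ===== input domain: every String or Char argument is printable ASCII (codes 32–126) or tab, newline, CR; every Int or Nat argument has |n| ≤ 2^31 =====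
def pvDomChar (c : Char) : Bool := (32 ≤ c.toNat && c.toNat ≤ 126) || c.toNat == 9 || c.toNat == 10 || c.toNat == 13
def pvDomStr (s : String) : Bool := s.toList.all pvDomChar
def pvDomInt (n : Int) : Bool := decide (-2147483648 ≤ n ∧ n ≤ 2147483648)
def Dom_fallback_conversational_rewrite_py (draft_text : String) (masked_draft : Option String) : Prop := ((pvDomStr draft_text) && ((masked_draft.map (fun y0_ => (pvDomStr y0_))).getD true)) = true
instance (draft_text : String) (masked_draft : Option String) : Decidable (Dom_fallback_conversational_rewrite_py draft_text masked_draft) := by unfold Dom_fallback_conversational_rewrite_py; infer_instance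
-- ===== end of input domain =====

-- B replaces A's six per-keyword substring flags and if-elif ladder with a single positional
-- scan of the text against a keyword→category table marking a boolean seen-array (objective:
-- alternative); return values are identical.

-- ===== PORT A =====
def fallback_conversational_rewrite_py (draft_text : String) (masked_draft : Option String) : String :=
  let source := PySem.Str.lower ((match masked_draft with
    | some m => if m ≠ "" then m else (if draft_text ≠ "" then draft_text else "")
    | none => if draft_text ≠ "" then draft_text else ""))
  let has_location := PySem.Str.isIn "location" source || PySem.Str.isIn "address" source || PySem.Str.isIn "where" source
  let has_phone := PySem.Str.isIn "phone" source || PySem.Str.isIn "mobile" source || PySem.Str.isIn "number" source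
  let has_email := PySem.Str.isIn "email" source || PySem.Str.isIn "mail" source
  let has_dob := PySem.Str.isIn "birth" source || PySem.Str.isIn "dob" source || PySem.Str.isIn "age" source
  let has_financial := PySem.Str.isIn "bank" source || PySem.Str.isIn "card" source || PySem.Str.isIn "account" source || PySem.Str.isIn "payment" source
  let has_id := PySem.Str.isIn "id" source || PySem.Str.isIn "passport" source || PySem.Str.isIn "nric" source || PySem.Str.isIn "license" source
  let sensitive_hits : Int :=
    ([has_location, has_phone, has_email, has_dob, has_financial, has_id].filter (fun flag => flag)).foldl (fun acc _ => acc + 1) 0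
  if sensitive_hits ≥ 2 then
    "I’m not comfortable sharing those personal details right now, but I can continue without them."
  else if has_location then
    "I’m not comfortable sharing my exact location right now."
  else if has_phone then
    "I’m not comfortable sharing my phone number right now."
  else if has_email then
    "I’d prefer not to share my email address right now."
  else if has_dob then
    "I’d prefer not to share my date of birth."
  else if has_financial then
    "I can’t share financial account details here."
  else if has_id then
    "I’m not comfortable sharing my ID details here."
  else
    "I’d prefer to keep that personal information private for now."

-- ===== PORT B =====
def pvKeywords : List (String × Int) :=
  [("location", 0), ("address", 0), ("where", 0),
   ("phone", 1), ("mobile", 1), ("number", 1),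
   ("email", 2), ("mail", 2),
   ("birth", 3), ("dob", 3), ("age", 3),
   ("bank", 4), ("card", 4), ("account", 4), ("payment", 4),
   ("id", 5), ("passport", 5), ("nric", 5), ("license", 5)]

def pvMessages : List String :=
  ["I’m not comfortable sharing my exact location right now.",
   "I’m not comfortable sharing my phone number right now.",
   "I’d prefer not to share my email address right now.",
   "I’d prefer not to share my date of birth.",
   "I can’t share financial account details here.",
   "I’m not comfortable sharing my ID details here."]

def fallback_conversational_rewrite_py_alt (draft_text : String) (masked_draft : Option String) : String :=
  let source := PySem.Str.lower ((match masked_draft with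
    | some m => if m ≠ "" then m else (if draft_text ≠ "" then draft_text else "")
    | none => if draft_text ≠ "" then draft_text else ""))
  let src := source.toList
  let seen : List Bool :=
    (List.range src.length).foldl
      (fun seen i =>
        pvKeywords.foldl
          (fun seen p =>
            -- source.startswith(kw, i) with 0 ≤ i ≤ len: exact as 'kw is a prefix of source[i:]'
            if PySem.Chars.startswith (src.drop i) p.1.toList then PySem.List.pySetD seen p.2 true else seen)
          seen)
      [false, false, false, false, false, false]
  let hits : Int := seen.foldl (fun acc flag => acc + (if flag then 1 else 0)) 0
  if hits ≥ 2 then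
    "I’m not comfortable sharing those personal details right now, but I can continue without them."
  else if seen.contains true then
    PySem.List.pyGetD pvMessages (((PySem.List.index? seen true).getD 0 : Nat) : Int) ""
  else
    "I’d prefer to keep that personal information private for now."

-- ===== PRECONDITION & SPEC =====
def Spec_fallback_conversational_rewrite_py (draft_text : String) (masked_draft : Option String) (out : String) : Prop := out = fallback_conversational_rewrite_py_alt draft_text masked_draft
instance (draft_text : String) (masked_draft : Option String) (out : String) : Decidable (Spec_fallback_conversational_rewrite_py draft_text masked_draft out) := by unfold Spec_fallback_conversational_rewrite_py; infer_instance

-- ===== CLAIM (what is proved, stated in full; the proofs are below) =====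
def Claim_equal_fallback_conversational_rewrite_py : Prop := ∀ (draft_text : String) (masked_draft : Option String), Dom_fallback_conversational_rewrite_py draft_text masked_draft → Spec_fallback_conversational_rewrite_py draft_text masked_draft (fallback_conversational_rewrite_py draft_text masked_draft)

-- ===== LEMMAS AND PROOFS =====

-- Both ports factor (definitionally) through their body applied to the shared lowered source.
def pvSource (draft_text : String) (masked_draft : Option String) : String :=
  PySem.Str.lower ((match masked_draft with
    | some m => if m ≠ "" then m else (if draft_text ≠ "" then draft_text else "")
    | none => if draft_text ≠ "" then draft_text else ""))

def pvBodyA (source : String) : String :=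
  let has_location := PySem.Str.isIn "location" source || PySem.Str.isIn "address" source || PySem.Str.isIn "where" source
  let has_phone := PySem.Str.isIn "phone" source || PySem.Str.isIn "mobile" source || PySem.Str.isIn "number" source
  let has_email := PySem.Str.isIn "email" source || PySem.Str.isIn "mail" source
  let has_dob := PySem.Str.isIn "birth" source || PySem.Str.isIn "dob" source || PySem.Str.isIn "age" source
  let has_financial := PySem.Str.isIn "bank" source || PySem.Str.isIn "card" source || PySem.Str.isIn "account" source || PySem.Str.isIn "payment" source
  let has_id := PySem.Str.isIn "id" source || PySem.Str.isIn "passport" source || PySem.Str.isIn "nric" source || PySem.Str.isIn "license" source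
  let sensitive_hits : Int :=
    ([has_location, has_phone, has_email, has_dob, has_financial, has_id].filter (fun flag => flag)).foldl (fun acc _ => acc + 1) 0
  if sensitive_hits ≥ 2 then
    "I’m not comfortable sharing those personal details right now, but I can continue without them."
  else if has_location then
    "I’m not comfortable sharing my exact location right now."
  else if has_phone then
    "I’m not comfortable sharing my phone number right now."
  else if has_email then
    "I’d prefer not to share my email address right now."
  else if has_dob then
    "I’d prefer not to share my date of birth."
  else if has_financial then
    "I can’t share financial account details here."
  else if has_id then
    "I’m not comfortable sharing my ID details here."
  else
    "I’d prefer to keep that personal information private for now."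

def pvSeen (src : List Char) : List Bool :=
  (List.range src.length).foldl
    (fun seen i =>
      pvKeywords.foldl
        (fun seen p =>
          if PySem.Chars.startswith (src.drop i) p.1.toList then PySem.List.pySetD seen p.2 true else seen)
        seen)
    [false, false, false, false, false, false]

def pvTailB (seen : List Bool) : String :=
  let hits : Int := seen.foldl (fun acc flag => acc + (if flag then 1 else 0)) 0
  if hits ≥ 2 then
    "I’m not comfortable sharing those personal details right now, but I can continue without them."
  else if seen.contains true then
    PySem.List.pyGetD pvMessages (((PySem.List.index? seen true).getD 0 : Nat) : Int) ""
  else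
    "I’d prefer to keep that personal information private for now."

lemma pvA_eq (draft_text : String) (masked_draft : Option String) :
    fallback_conversational_rewrite_py draft_text masked_draft = pvBodyA (pvSource draft_text masked_draft) := rfl

lemma pvB_eq (draft_text : String) (masked_draft : Option String) :
    fallback_conversational_rewrite_py_alt draft_text masked_draft
      = pvTailB (pvSeen (pvSource draft_text masked_draft).toList) := rfl

lemma pv_getD_set_true (xs : List Bool) (k c : Nat) :
    (xs.set k true).getD c false = ((decide (c = k) && decide (k < xs.length)) || xs.getD c false) := by
  by_cases hck : c = k
  · subst hck
    by_cases hk : c < xs.length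
    · simp [List.getD, hk]
    · simp [List.getD, hk, List.set_eq_of_length_le (by omega : xs.length ≤ c)]
  · simp [List.getD, List.getElem?_set_ne (by omega : k ≠ c), hck]

lemma pv_inner (KW : List (String × Int)) (cnd : String × Int → Bool)
    (hKW : ∀ p ∈ KW, 0 ≤ p.2 ∧ p.2 < 6) :
    ∀ (seen : List Bool), seen.length = 6 →
      (KW.foldl (fun s p => if cnd p then PySem.List.pySetD s p.2 true else s) seen).length = 6 ∧
      ∀ c : Nat,
        (KW.foldl (fun s p => if cnd p then PySem.List.pySetD s p.2 true else s) seen).getD c false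
          = (seen.getD c false || KW.any (fun p => cnd p && decide (p.2 = (c : Int)))) := by
  induction KW with
  | nil => intro seen hlen; simpa using hlen
  | cons p KW ih =>
    intro seen hlen
    have hp := hKW p (by simp)
    have hKW' : ∀ q ∈ KW, 0 ≤ q.2 ∧ q.2 < 6 := fun q hq => hKW q (by simp [hq])
    by_cases hc : cnd p
    · have hset : PySem.List.pySetD seen p.2 true = seen.set p.2.toNat true := by
        exact PySem.List.pySetD_of_nonneg _ _ hp.1
      have hlen' : (seen.set p.2.toNat true).length = 6 := by simp [hlen]
      obtain ⟨ihlen, ihget⟩ := ih hKW' (seen.set p.2.toNat true) hlen'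
      constructor
      · rw [List.foldl_cons, if_pos hc, hset]; exact ihlen
      · intro c
        rw [List.foldl_cons, if_pos hc, hset, ihget c, pv_getD_set_true]
        have hlt : p.2.toNat < seen.length := by omega
        by_cases hck : c = p.2.toNat
        · subst hck
          have hcast : p.2 = ((p.2.toNat : Nat) : Int) := by omega
          simp [List.any_cons, hc, hlt, ← hcast]
        · have hne : ¬ (p.2 = (c : Int)) := by omega
          simp [List.any_cons, hc, hck, hne]
    · obtain ⟨ihlen, ihget⟩ := ih hKW' seen hlen
      constructor
      · rw [List.foldl_cons, if_neg hc]; exact ihlen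
      · intro c
        rw [List.foldl_cons, if_neg hc, ihget c]
        simp [List.any_cons, hc]

lemma pv_outer (src : List Char) :
    ∀ (js : List Nat) (seen : List Bool), seen.length = 6 →
      (js.foldl (fun seen i =>
          pvKeywords.foldl (fun s p =>
            if PySem.Chars.startswith (src.drop i) p.1.toList then PySem.List.pySetD s p.2 true else s) seen)
        seen).length = 6 ∧
      ∀ c : Nat,
        (js.foldl (fun seen i =>
            pvKeywords.foldl (fun s p =>
              if PySem.Chars.startswith (src.drop i) p.1.toList then PySem.List.pySetD s p.2 true else s) seen)
          seen).getD c false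
          = (seen.getD c false ||
             js.any (fun i => pvKeywords.any (fun p =>
               PySem.Chars.startswith (src.drop i) p.1.toList && decide (p.2 = (c : Int))))) := by
  intro js
  induction js with
  | nil => intro seen hlen; simpa using hlen
  | cons j js ih =>
    intro seen hlen
    have hKW : ∀ p ∈ pvKeywords, 0 ≤ p.2 ∧ p.2 < 6 := by decide
    obtain ⟨hlen1, hget1⟩ :=
      pv_inner pvKeywords (fun p => PySem.Chars.startswith (src.drop j) p.1.toList) hKW seen hlen
    obtain ⟨ihlen, ihget⟩ := ih _ hlen1
    refine ⟨by simpa [List.foldl] using ihlen, fun c => ?_⟩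
    simp only [List.foldl]
    rw [ihget c, hget1 c]
    simp [List.any_cons, Bool.or_assoc]

lemma pv_any_range (src kw : List Char) (hkw : kw ≠ []) :
    (List.range src.length).any (fun i => PySem.Chars.startswith (src.drop i) kw)
      = PySem.Chars.isIn kw src := by
  rw [Bool.eq_iff_iff, List.any_eq_true, ← PySem.Chars.exists_prefix_drop_iff_isIn]
  constructor
  · rintro ⟨i, _, hsw⟩
    exact ⟨i, (PySem.Chars.startswith_iff _ _).mp hsw⟩
  · rintro ⟨j, hj⟩
    have hjlt : j < src.length := by
      by_contra h
      rw [List.drop_eq_nil_of_le (by omega)] at hj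
      exact hkw (List.prefix_nil.mp hj)
    exact ⟨j, List.mem_range.mpr hjlt, (PySem.Chars.startswith_iff _ _).mpr hj⟩

lemma pv_list6 (xs : List Bool) (h : xs.length = 6) :
    xs = [xs.getD 0 false, xs.getD 1 false, xs.getD 2 false,
          xs.getD 3 false, xs.getD 4 false, xs.getD 5 false] := by
  rcases xs with _ | ⟨a, _ | ⟨b, _ | ⟨c, _ | ⟨d, _ | ⟨e, _ | ⟨f, _ | ⟨g, t⟩⟩⟩⟩⟩⟩⟩ <;>
    simp_all [List.getD]

lemma pv_getD_false6 (c : Nat) :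
    ([false, false, false, false, false, false] : List Bool).getD c false = false := by
  match c with
  | 0 | 1 | 2 | 3 | 4 | 5 => rfl
  | (n+6) =>
    simp [List.getD]

lemma pv_any_or (l : List Nat) (f g : Nat → Bool) :
    (l.any fun i => f i || g i) = (l.any f || l.any g) := by
  rw [Bool.eq_iff_iff]
  simp only [List.any_eq_true, Bool.or_eq_true]
  constructor
  · rintro ⟨i, hi, h | h⟩
    · exact Or.inl ⟨i, hi, h⟩
    · exact Or.inr ⟨i, hi, h⟩
  · rintro (⟨i, hi, h⟩ | ⟨i, hi, h⟩)
    · exact ⟨i, hi, Or.inl h⟩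
    · exact ⟨i, hi, Or.inr h⟩

lemma pvSeen_eq (src : List Char) :
    pvSeen src =
      [PySem.Chars.isIn "location".toList src || PySem.Chars.isIn "address".toList src || PySem.Chars.isIn "where".toList src,
       PySem.Chars.isIn "phone".toList src || PySem.Chars.isIn "mobile".toList src || PySem.Chars.isIn "number".toList src,
       PySem.Chars.isIn "email".toList src || PySem.Chars.isIn "mail".toList src,
       PySem.Chars.isIn "birth".toList src || PySem.Chars.isIn "dob".toList src || PySem.Chars.isIn "age".toList src,
       PySem.Chars.isIn "bank".toList src || PySem.Chars.isIn "card".toList src || PySem.Chars.isIn "account".toList src || PySem.Chars.isIn "payment".toList src,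
       PySem.Chars.isIn "id".toList src || PySem.Chars.isIn "passport".toList src || PySem.Chars.isIn "nric".toList src || PySem.Chars.isIn "license".toList src] := by
  obtain ⟨hlen, hget⟩ := pv_outer src (List.range src.length)
    [false, false, false, false, false, false] (by rfl)
  have e : ∀ c : Nat, (pvSeen src).getD c false
      = (List.range src.length).any (fun i => pvKeywords.any (fun p =>
          PySem.Chars.startswith (src.drop i) p.1.toList && decide (p.2 = (c : Int)))) := by
    intro c
    rw [show (pvSeen src).getD c false = _ from hget c, pv_getD_false6, Bool.false_or]
  rw [pv_list6 (pvSeen src) hlen, e 0, e 1, e 2, e 3, e 4, e 5]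
  have k0 : ∀ i, pvKeywords.any (fun p => PySem.Chars.startswith (src.drop i) p.1.toList && decide (p.2 = ((0 : Nat) : Int)))
      = (PySem.Chars.startswith (src.drop i) "location".toList || PySem.Chars.startswith (src.drop i) "address".toList || PySem.Chars.startswith (src.drop i) "where".toList) := by
    intro i; simp [pvKeywords, Bool.or_assoc]
  have k1 : ∀ i, pvKeywords.any (fun p => PySem.Chars.startswith (src.drop i) p.1.toList && decide (p.2 = ((1 : Nat) : Int)))
      = (PySem.Chars.startswith (src.drop i) "phone".toList || PySem.Chars.startswith (src.drop i) "mobile".toList || PySem.Chars.startswith (src.drop i) "number".toList) := by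
    intro i; simp [pvKeywords, Bool.or_assoc]
  have k2 : ∀ i, pvKeywords.any (fun p => PySem.Chars.startswith (src.drop i) p.1.toList && decide (p.2 = ((2 : Nat) : Int)))
      = (PySem.Chars.startswith (src.drop i) "email".toList || PySem.Chars.startswith (src.drop i) "mail".toList) := by
    intro i; simp [pvKeywords, Bool.or_assoc]
  have k3 : ∀ i, pvKeywords.any (fun p => PySem.Chars.startswith (src.drop i) p.1.toList && decide (p.2 = ((3 : Nat) : Int)))
      = (PySem.Chars.startswith (src.drop i) "birth".toList || PySem.Chars.startswith (src.drop i) "dob".toList || PySem.Chars.startswith (src.drop i) "age".toList) := by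
    intro i; simp [pvKeywords, Bool.or_assoc]
  have k4 : ∀ i, pvKeywords.any (fun p => PySem.Chars.startswith (src.drop i) p.1.toList && decide (p.2 = ((4 : Nat) : Int)))
      = (PySem.Chars.startswith (src.drop i) "bank".toList || PySem.Chars.startswith (src.drop i) "card".toList || PySem.Chars.startswith (src.drop i) "account".toList || PySem.Chars.startswith (src.drop i) "payment".toList) := by
    intro i; simp [pvKeywords, Bool.or_assoc]
  have k5 : ∀ i, pvKeywords.any (fun p => PySem.Chars.startswith (src.drop i) p.1.toList && decide (p.2 = ((5 : Nat) : Int)))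
      = (PySem.Chars.startswith (src.drop i) "id".toList || PySem.Chars.startswith (src.drop i) "passport".toList || PySem.Chars.startswith (src.drop i) "nric".toList || PySem.Chars.startswith (src.drop i) "license".toList) := by
    intro i; simp [pvKeywords, Bool.or_assoc]
  simp only [k0, k1, k2, k3, k4, k5, pv_any_or,
    pv_any_range src _ (by decide : ("location".toList : List Char) ≠ []),
    pv_any_range src _ (by decide : ("address".toList : List Char) ≠ []),
    pv_any_range src _ (by decide : ("where".toList : List Char) ≠ []),
    pv_any_range src _ (by decide : ("phone".toList : List Char) ≠ []),
    pv_any_range src _ (by decide : ("mobile".toList : List Char) ≠ []),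
    pv_any_range src _ (by decide : ("number".toList : List Char) ≠ []),
    pv_any_range src _ (by decide : ("email".toList : List Char) ≠ []),
    pv_any_range src _ (by decide : ("mail".toList : List Char) ≠ []),
    pv_any_range src _ (by decide : ("birth".toList : List Char) ≠ []),
    pv_any_range src _ (by decide : ("dob".toList : List Char) ≠ []),
    pv_any_range src _ (by decide : ("age".toList : List Char) ≠ []),
    pv_any_range src _ (by decide : ("bank".toList : List Char) ≠ []),
    pv_any_range src _ (by decide : ("card".toList : List Char) ≠ []),
    pv_any_range src _ (by decide : ("account".toList : List Char) ≠ []),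
    pv_any_range src _ (by decide : ("payment".toList : List Char) ≠ []),
    pv_any_range src _ (by decide : ("id".toList : List Char) ≠ []),
    pv_any_range src _ (by decide : ("passport".toList : List Char) ≠ []),
    pv_any_range src _ (by decide : ("nric".toList : List Char) ≠ []),
    pv_any_range src _ (by decide : ("license".toList : List Char) ≠ [])]

def pvLadder (b1 b2 b3 b4 b5 b6 : Bool) : String :=
  let sensitive_hits : Int :=
    ([b1, b2, b3, b4, b5, b6].filter (fun flag => flag)).foldl (fun acc _ => acc + 1) 0
  if sensitive_hits ≥ 2 then
    "I’m not comfortable sharing those personal details right now, but I can continue without them."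
  else if b1 then
    "I’m not comfortable sharing my exact location right now."
  else if b2 then
    "I’m not comfortable sharing my phone number right now."
  else if b3 then
    "I’d prefer not to share my email address right now."
  else if b4 then
    "I’d prefer not to share my date of birth."
  else if b5 then
    "I can’t share financial account details here."
  else if b6 then
    "I’m not comfortable sharing my ID details here."
  else
    "I’d prefer to keep that personal information private for now."

lemma pvBodyA_ladder (source : String) :
    pvBodyA source = pvLadder
      (PySem.Str.isIn "location" source || PySem.Str.isIn "address" source || PySem.Str.isIn "where" source)
      (PySem.Str.isIn "phone" source || PySem.Str.isIn "mobile" source || PySem.Str.isIn "number" source)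
      (PySem.Str.isIn "email" source || PySem.Str.isIn "mail" source)
      (PySem.Str.isIn "birth" source || PySem.Str.isIn "dob" source || PySem.Str.isIn "age" source)
      (PySem.Str.isIn "bank" source || PySem.Str.isIn "card" source || PySem.Str.isIn "account" source || PySem.Str.isIn "payment" source)
      (PySem.Str.isIn "id" source || PySem.Str.isIn "passport" source || PySem.Str.isIn "nric" source || PySem.Str.isIn "license" source) := rfl

lemma pvLadder_tail (b1 b2 b3 b4 b5 b6 : Bool) :
    pvLadder b1 b2 b3 b4 b5 b6 = pvTailB [b1, b2, b3, b4, b5, b6] := by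
  cases b1 <;> cases b2 <;> cases b3 <;> cases b4 <;> cases b5 <;> cases b6 <;> rfl

-- ===== VERDICT (by name: the statement is the Claim_ definition above) =====
theorem fallback_conversational_rewrite_py_spec : Claim_equal_fallback_conversational_rewrite_py := by
  intro draft_text masked_draft _
  unfold Spec_fallback_conversational_rewrite_py
  rw [pvA_eq, pvB_eq, pvSeen_eq, pvBodyA_ladder, pvLadder_tail]
  simp only [PySem.Str.isIn_eq]
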